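-- pv_equiv track=rewrite | github.com/himanshunita009/Python-DSA | CodeForces/Day1/Problem1.py | solve
-- ===== SOURCE A (Python) =====
-- def solve(nums: list[int]) :
--     nums.sort()
--     ans = 0
--     for idx in range(len(nums)):
--         if nums[idx] == 0:
--             ans += 1
--         else :
--             ans += nums[idx]
--     return ans
-- ===== SOURCE B (Python) =====
-- def _first(nums, pred):
--     # binary search: first index at which pred fails (nums sorted, pred downward-closed)
--     lo, hi = 0, len(nums)
--     while lo < hi:
--         mid = (lo + hi) // 2
--         if pred(nums[mid]):
--             lo = mid + 1
--         else:
--             hi = mid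
--     return lo
--
--
-- def solve(nums: list[int]):
--     nums.sort()  # kept to preserve A's in-place mutation of the argument
--     left = _first(nums, lambda x: x < 0)    # start of the zero block
--     right = _first(nums, lambda x: x <= 0)  # end of the zero block
--     return sum(nums) + (right - left)
-- ===== Notes on version B (the rewrite author's own statement) =====
-- stated objective: alternative
-- what changed: Instead of a branching accumulation loop, B locates the contiguous block of zeros in the sorted list by two hand-written binary searches and returns sum(nums) plus the block's width (each zero must count as 1, not 0).
import Mathlib
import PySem

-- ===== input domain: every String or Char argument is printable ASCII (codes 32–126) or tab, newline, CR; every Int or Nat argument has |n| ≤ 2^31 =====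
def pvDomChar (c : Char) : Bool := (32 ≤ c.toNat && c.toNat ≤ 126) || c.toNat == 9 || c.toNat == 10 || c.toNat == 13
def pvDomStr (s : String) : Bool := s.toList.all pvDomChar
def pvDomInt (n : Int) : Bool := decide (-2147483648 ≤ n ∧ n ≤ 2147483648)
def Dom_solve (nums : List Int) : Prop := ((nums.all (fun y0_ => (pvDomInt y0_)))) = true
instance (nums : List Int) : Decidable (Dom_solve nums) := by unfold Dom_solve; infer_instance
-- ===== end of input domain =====

-- B finds the contiguous zero block of the sorted list by two binary searches and returns
-- sum + block width, instead of A's branching accumulation loop (alternative algorithm);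
-- B keeps nums.sort(), so the in-place mutation matches A; the equivalence is about the return value.
-- ===== PORT A =====
def solve (nums : List Int) : Int :=
  let s := PySem.List.sorted nums (fun x => x) false
  (PySem.List.pyRange 0 s.length 1).foldl
    (fun ans idx =>
      if PySem.List.pyGetD s idx 0 = 0 then ans + 1 else ans + PySem.List.pyGetD s idx 0) 0

-- ===== PORT B =====
-- port of Source B's `_first`: binary search, first index at which pred fails
def firstIdx (s : List Int) (pred : Int → Bool) (lo hi : Nat) : Nat :=
  if _h : lo < hi then
    let mid := (lo + hi) / 2
    if pred (s.getD mid 0) then firstIdx s pred (mid + 1) hi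
    else firstIdx s pred lo mid
  else lo
termination_by hi - lo
decreasing_by all_goals omega

def solve_alt (nums : List Int) : Int :=
  let s := PySem.List.sorted nums (fun x => x) false
  let left := firstIdx s (fun x => decide (x < 0)) 0 s.length
  let right := firstIdx s (fun x => decide (x ≤ 0)) 0 s.length
  s.sum + ((right : Int) - (left : Int))

-- ===== PRECONDITION & SPEC =====
def Spec_solve (nums : List Int) (out : Int) : Prop := out = solve_alt nums
instance (nums : List Int) (out : Int) : Decidable (Spec_solve nums out) := by unfold Spec_solve; infer_instance

-- ===== CLAIM (what is proved, stated in full; the proofs are below) =====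
def Claim_equal_solve : Prop := ∀ (nums : List Int), Dom_solve nums → Spec_solve nums (solve nums)

-- ===== LEMMAS AND PROOFS =====

-- A's loop is sum + number of zeros
theorem loop_eq_sum_count (l : List Int) (a : Int) :
    l.foldl (fun ans x => if x = 0 then ans + 1 else ans + x) a
      = a + l.sum + (l.count 0 : Int) := by
  induction l generalizing a with
  | nil => simp
  | cons x t ih =>
    simp only [List.foldl_cons, List.sum_cons, List.count_cons, ih]
    by_cases h : x = 0 <;> simp [h] <;> omega

-- in a sorted list, a downward-closed predicate holds exactly on the prefix of length countP
theorem prefix_char (p : Int → Bool) (hmono : ∀ x y : Int, x ≤ y → p y = true → p x = true)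
    (s : List Int) (hs : s.Pairwise (· ≤ ·)) :
    ∀ i, i < s.length → (p (s.getD i 0) = true ↔ i < s.countP p) := by
  induction s with
  | nil => intro i hi; simp at hi
  | cons a t ih =>
    rw [List.pairwise_cons] at hs
    intro i hi
    cases i with
    | zero =>
      simp only [List.getD_cons_zero, List.countP_cons]
      constructor
      · intro hp; simp [hp]
      · intro hpos
        by_contra hna
        have h0 : t.countP p = 0 := by
          rw [List.countP_eq_zero]
          intro x hx hpx
          exact (Bool.eq_false_iff.mp (Bool.not_eq_true _ ▸ (by simpa using hna)))
            (hmono a x (hs.1 x hx) hpx)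
        simp [h0, Bool.eq_false_iff.mpr (by simpa using hna)] at hpos
    | succ j =>
      simp only [List.getD_cons_succ, List.countP_cons]
      have hj : j < t.length := by simpa using hi
      by_cases hpa : p a = true
      · rw [ih hs.2 j hj]
        simp [hpa]
      · have h0 : t.countP p = 0 := by
          rw [List.countP_eq_zero]
          intro x hx hpx
          exact hpa (hmono a x (hs.1 x hx) hpx)
        have hne : ¬ p (t.getD j 0) = true := by
          intro hh; rw [ih hs.2 j hj] at hh; omega
        have hz : t.countP p + (if p a = true then 1 else 0) = 0 := by simp [hpa, h0]
        rw [hz]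
        constructor
        · intro hh; exact absurd hh hne
        · intro hh; exact absurd hh (by omega)

-- binary search returns k when the predicate holds exactly below k
theorem firstIdx_eq (s : List Int) (p : Int → Bool) (k : Nat)
    (hchar : ∀ i, i < s.length → (p (s.getD i 0) = true ↔ i < k)) :
    ∀ n lo hi, hi - lo ≤ n → lo ≤ k → k ≤ hi → hi ≤ s.length → firstIdx s p lo hi = k := by
  intro n
  induction n with
  | zero =>
    intro lo hi hn hlo hhi _
    rw [firstIdx]
    have : ¬ lo < hi := by omega
    simp [this]; omega
  | succ m ih =>
    intro lo hi hn hlo hhi hs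
    rw [firstIdx]
    by_cases h : lo < hi
    · simp only [h, dif_pos]
      have hmid : (lo + hi) / 2 < s.length := by omega
      by_cases hp : p (s.getD ((lo + hi) / 2) 0) = true
      · have hk : (lo + hi) / 2 < k := (hchar _ hmid).mp hp
        simp only [hp, if_pos]
        exact ih _ hi (by omega) (by omega) hhi hs
      · have hk : ¬ ((lo + hi) / 2 < k) := fun hlt => hp ((hchar _ hmid).mpr hlt)
        simp only [hp, if_neg, Bool.false_eq_true, not_false_iff]
        exact ih lo _ (by omega) hlo (by omega) (by omega)
    · simp [h]; omega

-- splitting countP (≤ 0) into countP (< 0) + count 0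
theorem countP_le_split (l : List Int) :
    l.countP (fun x => decide (x ≤ 0)) = l.countP (fun x => decide (x < 0)) + l.count 0 := by
  induction l with
  | nil => simp
  | cons x t ih =>
    simp only [List.countP_cons, List.count_cons, ih]
    by_cases h1 : x < 0
    · have hne : (x == 0) = false := by simp; omega
      simp [h1, le_of_lt h1, hne]
      omega
    · by_cases h2 : x = 0
      · subst h2
        simp
        omega
      · have hle : ¬ x ≤ 0 := by omega
        have hne : (x == 0) = false := by simp [h2]
        simp [h1, hle, hne]

-- ===== VERDICT (by name: the statement is the Claim_ definition above) =====
theorem solve_spec : Claim_equal_solve := by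
  intro nums _
  unfold Spec_solve solve solve_alt
  rw [PySem.List.foldl_pyRange_zero_pyGetD' (PySem.List.sorted nums (fun x => x) false) 0
        (fun ans x => if x = 0 then ans + 1 else ans + x) 0]
  rw [loop_eq_sum_count]
  set s := PySem.List.sorted nums (fun x => x) false with hsdef
  have hpair : s.Pairwise (· ≤ ·) := by
    simpa using PySem.List.sorted_pairwise nums (fun x => x)
  have h1 : firstIdx s (fun x => decide (x < 0)) 0 s.length
      = s.countP (fun x => decide (x < 0)) := by
    apply firstIdx_eq s _ _ (prefix_char _ (by intro x y hxy hy; simp at *; omega) s hpair)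
      s.length 0 s.length (by omega) (Nat.zero_le _) List.countP_le_length le_rfl
  have h2 : firstIdx s (fun x => decide (x ≤ 0)) 0 s.length
      = s.countP (fun x => decide (x ≤ 0)) := by
    apply firstIdx_eq s _ _ (prefix_char _ (by intro x y hxy hy; simp at *; omega) s hpair)
      s.length 0 s.length (by omega) (Nat.zero_le _) List.countP_le_length le_rfl
  simp only [h1, h2, countP_le_split]
  push_cast
  ring
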